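-- pv_equiv track=rewrite | github.com/Saffr0n1/advent_of_code_2023 | day18/main.py | get_hex_boundary
-- ===== SOURCE A (Python) =====
-- NUM_DIR = {0: (0, 1), 2: (0, -1), 3: (-1, 0), 1: (1, 0)}
--
-- def get_hex_boundary(commands):
--     boundary, boundary_len = [(0, 0)], 0
--     for command in commands:
--         curr_x, curr_y = boundary[-1]
--         steps, dir_num = int(command[2][1:6], 16), int(command[2][-1])
--         curr_x += steps * NUM_DIR[dir_num][0]
--         curr_y += steps * NUM_DIR[dir_num][1]
--         boundary_len += steps
--         boundary.append((curr_x, curr_y))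
--
--     return boundary, boundary_len
-- ===== SOURCE B (Python) =====
-- CHAR_DIR = {'0': (0, 1), '2': (0, -1), '3': (-1, 0), '1': (1, 0)}
--
-- def get_hex_boundary(commands):
--     return _walk(list(commands))
--
-- def _walk(cmds):
--     # Divide and conquer: a boundary is computed relative to its own origin;
--     # halves are merged by translating the right half to the left half's endpoint.
--     if not cmds:
--         return [(0, 0)], 0
--     if len(cmds) == 1:
--         s = cmds[0][2]
--         n = int(s[1:6], 16)
--         dx, dy = CHAR_DIR[s[-1]]
--         return [(0, 0), (n * dx, n * dy)], n
--     mid = len(cmds) // 2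
--     lp, ln = _walk(cmds[:mid])
--     rp, rn = _walk(cmds[mid:])
--     ex, ey = lp[-1]
--     return lp[:-1] + [(ex + x, ey + y) for x, y in rp], ln + rn
-- ===== Notes on version B (the rewrite author's own statement) =====
-- stated objective: alternative
-- what changed: A builds the boundary in one sequential loop that extends the list from its last absolute point; B is a divide-and-conquer recursion: each half's boundary is computed relative to its own origin and the halves are merged by translating the right half's points to the left half's endpoint (correct because the walk is translation-invariant).
import Mathlib
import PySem

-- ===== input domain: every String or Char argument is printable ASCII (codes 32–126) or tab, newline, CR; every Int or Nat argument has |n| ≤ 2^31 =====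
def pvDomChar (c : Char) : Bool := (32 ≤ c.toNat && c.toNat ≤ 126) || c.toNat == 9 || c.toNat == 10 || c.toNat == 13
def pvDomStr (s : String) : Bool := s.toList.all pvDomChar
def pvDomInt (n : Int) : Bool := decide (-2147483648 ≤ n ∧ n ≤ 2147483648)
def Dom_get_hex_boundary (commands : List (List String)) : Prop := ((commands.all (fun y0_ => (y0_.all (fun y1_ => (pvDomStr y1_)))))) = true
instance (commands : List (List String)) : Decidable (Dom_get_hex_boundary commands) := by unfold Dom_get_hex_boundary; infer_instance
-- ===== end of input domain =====

-- B replaces A's sequential loop (which extends the list from its last absolute point) by a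
-- divide-and-conquer recursion: each half's boundary is built relative to its own origin and
-- the halves are merged by translating the right half to the left half's endpoint.

-- ===== PORT A =====
def numDir : PySem.Dict Int (Int × Int) :=
  PySem.Dict.ofList [(0, (0, 1)), (2, (0, -1)), (3, (-1, 0)), (1, (1, 0))]

def get_hex_boundary (commands : List (List String)) : (List (Int × Int)) × Int :=
  commands.foldl (fun st command =>
    let curr := (PySem.List.pyGet? st.1 (-1)).getD (0, 0)
    let s := (PySem.List.pyGet? command 2).getD ""
    let steps := (PySem.Int.ofStrBase? (PySem.Str.slice s (some 1) (some 6)) 16).getD 0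
    let dirNum := (PySem.Int.ofChars? [(PySem.Str.pyGet? s (-1)).getD ' ']).getD 0
    let d := (PySem.Dict.get? numDir dirNum).getD (0, 0)
    (st.1 ++ [(curr.1 + steps * d.1, curr.2 + steps * d.2)], st.2 + steps))
    ([(0, 0)], 0)

-- ===== PORT B =====
def charDir : PySem.Dict Char (Int × Int) :=
  PySem.Dict.ofList [('0', (0, 1)), ('2', (0, -1)), ('3', (-1, 0)), ('1', (1, 0))]

-- Source B's _walk: divide-and-conquer with translation merge.
def walkB : List (List String) → (List (Int × Int)) × Int
  | [] => ([(0, 0)], 0)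
  | [c] =>
    let s := (PySem.List.pyGet? c 2).getD ""
    let n := (PySem.Int.ofStrBase? (PySem.Str.slice s (some 1) (some 6)) 16).getD 0
    let d := (PySem.Dict.get? charDir ((PySem.Str.pyGet? s (-1)).getD ' ')).getD (0, 0)
    ([(0, 0), (n * d.1, n * d.2)], n)
  | a :: b :: t =>
    let cs := a :: b :: t
    let mid := cs.length / 2
    let l := walkB (cs.take mid)
    let r := walkB (cs.drop mid)
    let e := (PySem.List.pyGet? l.1 (-1)).getD (0, 0)
    (PySem.List.slice l.1 none (some (-1)) ++ r.1.map (fun p => (e.1 + p.1, e.2 + p.2)),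
     l.2 + r.2)
termination_by cs => cs.length
decreasing_by
  · simp [List.length_take]; omega
  · simp; omega

def get_hex_boundary_alt (commands : List (List String)) : (List (Int × Int)) × Int :=
  walkB commands

-- ===== PRECONDITION & SPEC =====
-- Pre_ holds exactly when every command parses in A: it has a third field s, int(s[1:6], 16)
-- succeeds, and the last character of s is one of '0'..'3' (otherwise A raises IndexError,
-- ValueError or KeyError).
def preCmd (c : List String) : Bool :=
  match PySem.List.pyGet? c 2 with
  | none => false
  | some s =>
    (PySem.Int.ofStrBase? (PySem.Str.slice s (some 1) (some 6)) 16).isSome &&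
    match PySem.Str.pyGet? s (-1) with
    | none => false
    | some ch => ch == '0' || ch == '1' || ch == '2' || ch == '3'

def Pre_get_hex_boundary (commands : List (List String)) : Prop :=
  commands.all preCmd = true

instance (commands : List (List String)) : Decidable (Pre_get_hex_boundary commands) := by
  unfold Pre_get_hex_boundary; infer_instance

def pvWitness_get_hex_boundary : List (List String) :=
  [["R", "6", "#70c710"], ["D", "5", "#0dc571"], ["L", "2", "#5713f0"]]

def Spec_get_hex_boundary (commands : List (List String)) (out : (List (Int × Int)) × Int) : Prop := out = get_hex_boundary_alt commands
instance (commands : List (List String)) (out : (List (Int × Int)) × Int) : Decidable (Spec_get_hex_boundary commands out) := by unfold Spec_get_hex_boundary; infer_instance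

-- ===== CLAIM (what is proved, stated in full; the proofs are below) =====
def Claim_equal_get_hex_boundary : Prop := ∀ (commands : List (List String)), Dom_get_hex_boundary commands → Pre_get_hex_boundary commands → Spec_get_hex_boundary commands (get_hex_boundary commands)

-- ===== LEMMAS AND PROOFS =====

-- Proof-only names for the per-command quantities the two programs compute.
def stepsOf (c : List String) : Int :=
  (PySem.Int.ofStrBase? (PySem.Str.slice ((PySem.List.pyGet? c 2).getD "") (some 1) (some 6)) 16).getD 0

def dirOf (c : List String) : Int × Int :=
  (PySem.Dict.get? numDir
    ((PySem.Int.ofChars? [(PySem.Str.pyGet? ((PySem.List.pyGet? c 2).getD "") (-1)).getD ' ']).getD 0)).getD (0, 0)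

def dirOfB (c : List String) : Int × Int :=
  (PySem.Dict.get? charDir
    ((PySem.Str.pyGet? ((PySem.List.pyGet? c 2).getD "") (-1)).getD ' ')).getD (0, 0)

def deltaA (c : List String) : Int × Int := (stepsOf c * (dirOf c).1, stepsOf c * (dirOf c).2)
def deltaB (c : List String) : Int × Int := (stepsOf c * (dirOfB c).1, stepsOf c * (dirOfB c).2)

-- Reference prefix scan both programs are reduced to.
def scanPts : Int → Int → List (Int × Int) → List (Int × Int)
  | x, y, [] => [(x, y)]
  | x, y, (dx, dy) :: rest => (x, y) :: scanPts (x + dx) (y + dy) rest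

-- A's loop body, written out (definitionally A's fold function).
def stepA (st : (List (Int × Int)) × Int) (c : List String) : (List (Int × Int)) × Int :=
  (st.1 ++ [(((PySem.List.pyGet? st.1 (-1)).getD (0, 0)).1 + (deltaA c).1,
             ((PySem.List.pyGet? st.1 (-1)).getD (0, 0)).2 + (deltaA c).2)],
   st.2 + stepsOf c)

lemma A_eq_foldl (commands : List (List String)) :
    get_hex_boundary commands = commands.foldl stepA ([(0, 0)], 0) := rfl

-- On a command admitted by Pre_, A's direction (via int of the last char) equals B's (via the char).
lemma dir_agree (c : List String) (h : preCmd c = true) : dirOf c = dirOfB c := by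
  unfold preCmd at h
  cases hs : PySem.List.pyGet? c 2 with
  | none => simp [hs] at h
  | some s =>
    rw [hs] at h
    simp only [Bool.and_eq_true] at h
    obtain ⟨-, h2⟩ := h
    cases hch : PySem.Str.pyGet? s (-1) with
    | none => rw [hch] at h2; simp at h2
    | some ch =>
      rw [hch] at h2
      unfold dirOf dirOfB
      simp only [hs, hch, Option.getD_some]
      rcases Bool.or_eq_true _ _ |>.mp h2 with h' | h3
      · rcases Bool.or_eq_true _ _ |>.mp h' with h'' | h3
        · rcases Bool.or_eq_true _ _ |>.mp h'' with h3 | h3 <;>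
            (rw [eq_of_beq h3]; decide)
        · rw [eq_of_beq h3]; decide
      · rw [eq_of_beq h3]; decide

-- A's loop, started after a partial boundary ending at (x, y), appends exactly the prefix scan
-- of the remaining scaled deltas and adds their step counts.
lemma loopA (cs : List (List String)) (b : List (Int × Int)) (x y t : Int) :
    cs.foldl stepA (b ++ [(x, y)], t)
      = (b ++ scanPts x y (cs.map deltaA), t + (cs.map stepsOf).sum) := by
  induction cs generalizing b x y t with
  | nil => simp [scanPts]
  | cons c cs ih =>
    rw [List.foldl_cons]
    have hstep : stepA (b ++ [(x, y)], t)
        c = ((b ++ [(x, y)]) ++ [(x + (deltaA c).1, y + (deltaA c).2)], t + stepsOf c) := by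
      unfold stepA
      rw [PySem.List.pyGet?_neg_one_append_singleton]
      rfl
    rw [hstep, ih]
    simp [scanPts, List.append_assoc, add_assoc, deltaA]

-- Translation invariance of the scan.
lemma scanPts_shift (a b x y : Int) (ds : List (Int × Int)) :
    scanPts (a + x) (b + y) ds = (scanPts x y ds).map (fun p => (a + p.1, b + p.2)) := by
  induction ds generalizing x y with
  | nil => simp [scanPts]
  | cons d ds ih =>
    obtain ⟨dx, dy⟩ := d
    simp only [scanPts, List.map_cons]
    rw [add_assoc a x dx, add_assoc b y dy, ih]

lemma scanPts_ne_nil (x y : Int) (ds : List (Int × Int)) : scanPts x y ds ≠ [] := by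
  cases ds <;> simp [scanPts]

-- Splitting the scan at an arbitrary point.
lemma scanPts_append (ds es : List (Int × Int)) (x y : Int) :
    scanPts x y (ds ++ es)
      = (scanPts x y ds).dropLast
        ++ scanPts (x + (ds.map Prod.fst).sum) (y + (ds.map Prod.snd).sum) es := by
  induction ds generalizing x y with
  | nil => simp [scanPts]
  | cons d ds ih =>
    obtain ⟨dx, dy⟩ := d
    simp only [List.cons_append, scanPts, List.map_cons, List.sum_cons]
    rw [List.dropLast_cons_of_ne_nil (scanPts_ne_nil _ _ _), List.cons_append, ih]
    simp only [← add_assoc]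

-- The scan written as its dropLast plus its endpoint.
lemma scanPts_eq_dropLast_append (ds : List (Int × Int)) (x y : Int) :
    scanPts x y ds
      = (scanPts x y ds).dropLast
        ++ [(x + (ds.map Prod.fst).sum, y + (ds.map Prod.snd).sum)] := by
  have h := scanPts_append ds [] x y
  simpa [scanPts] using h

lemma scanPts_last (ds : List (Int × Int)) (x y : Int) :
    PySem.List.pyGet? (scanPts x y ds) (-1)
      = some (x + (ds.map Prod.fst).sum, y + (ds.map Prod.snd).sum) := by
  rw [scanPts_eq_dropLast_append ds x y, PySem.List.pyGet?_neg_one_append_singleton]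

-- B's recursion computes the same scan and the same total.
lemma walkB_eq (cs : List (List String)) :
    walkB cs = (scanPts 0 0 (cs.map deltaB), (cs.map stepsOf).sum) := by
  induction hn : cs.length using Nat.strong_induction_on generalizing cs with
  | _ n ih =>
    match cs with
    | [] => simp [walkB, scanPts]
    | [c] =>
      simp [walkB, scanPts, deltaB, stepsOf, dirOfB]
    | a :: b :: t =>
      rw [walkB]
      have hlen : (a :: b :: t).length = n := hn
      set cs := a :: b :: t with hcs
      set mid := cs.length / 2 with hmid
      have h2 : 2 ≤ cs.length := by simp [hcs]
      have hmid1 : 1 ≤ mid := by omega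
      have hmidlt : mid < cs.length := by omega
      have hl := ih (cs.take mid).length (by simp [List.length_take]; omega) (cs.take mid) rfl
      have hr := ih (cs.drop mid).length (by simp; omega) (cs.drop mid) rfl
      simp only [hl, hr]
      rw [scanPts_last]
      simp only [Option.getD_some, zero_add]
      rw [PySem.List.slice_to_neg_one]
      have hshift := scanPts_shift (((cs.take mid).map deltaB).map Prod.fst).sum
        (((cs.take mid).map deltaB).map Prod.snd).sum 0 0 ((cs.drop mid).map deltaB)
      simp only [add_zero] at hshift
      rw [← hshift]
      have hsplit := scanPts_append ((cs.take mid).map deltaB) ((cs.drop mid).map deltaB) 0 0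
      simp only [zero_add] at hsplit
      rw [← hsplit, ← List.map_append, List.take_append_drop]
      have hsum : ((cs.take mid).map stepsOf).sum + ((cs.drop mid).map stepsOf).sum
          = (cs.map stepsOf).sum := by
        rw [← List.sum_append, ← List.map_append, List.take_append_drop]
      rw [hsum]

-- ===== VERDICT (by name: the statement is the Claim_ definition above) =====
set_option maxHeartbeats 800000 in
theorem get_hex_boundary_spec : Claim_equal_get_hex_boundary := by
  unfold Claim_equal_get_hex_boundary
  intro commands _ hpre
  unfold Pre_get_hex_boundary at hpre
  rw [List.all_eq_true] at hpre
  unfold Spec_get_hex_boundary get_hex_boundary_alt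
  rw [A_eq_foldl, walkB_eq]
  have hA := loopA commands [] 0 0 0
  simp only [List.nil_append, zero_add] at hA
  rw [hA]
  have hm : commands.map deltaA = commands.map deltaB := by
    apply List.map_congr_left
    intro c hc
    simp [deltaA, deltaB, dir_agree c (hpre c hc)]
  rw [hm]
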